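-- pv_equiv track=rewrite | github.com/dianpeng/sillynet | sillynet.py | _formatWeight
-- ===== SOURCE A (Python) =====
-- def _formatWeight(num):
--     if num <= 4:
--         return [1 for _ in range(num)]
--     else:
--         ret = [1,1,1,1]
--         num-=4
--
--         round1 = min(num,12)
--
--         for i in range(round1):
--             ret.append( i + 1 )
--
--         num -= round1
--
--         if num == 0:
--             return ret
--
--         for i in range(num):
--             ret.append( round1 + i*2 )
--
--         return ret
-- ===== SOURCE B (Python) =====
-- def _formatWeight(num):
--     # Delta/prefix-sum approach: the weights are the running sums of a fixed
--     # increment stream (four 0s, eleven +1s, one 0, then +2 forever), started at 1.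
--     if num <= 0:
--         return []
--     deltas = ([0] * 4 + [1] * 11 + [0] + [2] * max(num - 17, 0))[:num - 1]
--     out = [1]
--     for d in deltas:
--         out.append(out[-1] + d)
--     return out
-- ===== Notes on version B (the rewrite author's own statement) =====
-- stated objective: alternative
-- what changed: Replaces A's three staged append loops by a prefix-sum (scan) of a fixed increment/delta stream: the weight list is the running sums of [0]*4+[1]*11+[0]+[2]*... started at 1, truncated to length num.
import Mathlib
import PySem

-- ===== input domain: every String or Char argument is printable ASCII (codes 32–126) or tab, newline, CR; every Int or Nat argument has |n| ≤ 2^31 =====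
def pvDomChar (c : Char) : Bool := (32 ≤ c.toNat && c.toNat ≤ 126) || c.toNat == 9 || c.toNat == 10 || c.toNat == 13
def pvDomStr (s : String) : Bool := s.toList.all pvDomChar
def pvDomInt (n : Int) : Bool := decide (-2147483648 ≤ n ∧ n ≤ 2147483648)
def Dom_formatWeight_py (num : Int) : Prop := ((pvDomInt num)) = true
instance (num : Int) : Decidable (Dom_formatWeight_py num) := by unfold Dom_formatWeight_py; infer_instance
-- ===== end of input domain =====

-- B replaces A's three staged append loops by a prefix-sum (scan) of a fixed
-- increment/delta stream started at 1 (objective: alternative algorithm, same cost).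


-- ===== PORT A =====
def formatWeight_py (num : Int) : List Int :=
  if num ≤ 4 then
    (PySem.List.pyRange 0 num 1).map (fun _ => (1 : Int))
  else
    let ret : List Int := [1, 1, 1, 1]
    let num1 := num - 4
    let round1 := min num1 12
    let ret := (PySem.List.pyRange 0 round1 1).foldl (fun acc i => acc ++ [i + 1]) ret
    let num2 := num1 - round1
    if num2 = 0 then ret
    else (PySem.List.pyRange 0 num2 1).foldl (fun acc i => acc ++ [round1 + i * 2]) ret

-- ===== PORT B =====
-- out[-1] is ported as .getLastD 0: exact, since out starts as [1] and only grows;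
-- the slice [:num-1] and the replicate count use .toNat: exact, both ints are ≥ 0 here.
def formatWeight_py_alt (num : Int) : List Int :=
  if num ≤ 0 then []
  else
    let deltas := (List.replicate 4 (0 : Int) ++ List.replicate 11 1 ++ [0] ++
                   List.replicate (max (num - 17) 0).toNat 2).take (num - 1).toNat
    deltas.foldl (fun out d => out ++ [out.getLastD 0 + d]) [1]

-- ===== PRECONDITION & SPEC =====
def Spec_formatWeight_py (num : Int) (out : List Int) : Prop := out = formatWeight_py_alt num
instance (num : Int) (out : List Int) : Decidable (Spec_formatWeight_py num out) := by unfold Spec_formatWeight_py; infer_instance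

-- ===== CLAIM (what is proved, stated in full; the proofs are below) =====
def Claim_equal_formatWeight_py : Prop := ∀ (num : Int), Dom_formatWeight_py num → Spec_formatWeight_py num (formatWeight_py num)

-- ===== LEMMAS AND PROOFS =====

-- the weight at (0-based) position k, independent of num
def pvW (k : Int) : Int := if k < 4 then 1 else if k < 16 then k - 3 else 12 + 2 * (k - 16)

-- the k-th increment of B's delta stream
def pvDelta (k : Nat) : Int := if k < 4 then 0 else if k < 15 then 1 else if k = 15 then 0 else 2

theorem pvW_step (k : Nat) : pvW k + pvDelta k = pvW (k + 1) := by
  unfold pvW pvDelta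
  split_ifs <;> push_cast <;> omega

-- A's result is the pointwise-formula list
theorem formatWeight_A_eq_map (num : Int) :
    formatWeight_py num = (PySem.List.pyRange 0 num 1).map pvW := by
  unfold formatWeight_py
  by_cases h : num ≤ 4
  · simp only [if_pos h]
    apply List.map_congr_left
    intro j hj
    rw [PySem.List.mem_pyRange_one] at hj
    have : j < 4 := by omega
    simp [pvW, this]
  · simp only [if_neg h]
    set r1 := min (num - 4) 12 with hr1def
    have hr1nn : 0 ≤ r1 := by omega
    have hr1le : r1 ≤ num - 4 := by omega
    set m := num - 4 - r1 with hmdef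
    rw [PySem.List.pyRange_one_append 0 4 num (by omega) (by omega),
        PySem.List.pyRange_one_append 4 (4 + r1) num (by omega) (by omega)]
    simp only [List.map_append]
    have c1 : (PySem.List.pyRange 0 4 1).map pvW = [1, 1, 1, 1] := by decide
    have c2 : (PySem.List.pyRange 4 (4 + r1) 1).map pvW
        = (PySem.List.pyRange 0 r1 1).map (fun i => i + 1) := by
      rw [PySem.List.pyRange_one 4 (4 + r1), PySem.List.pyRange_one 0 r1]
      have hlen : (4 + r1 - 4).toNat = (r1 - 0).toNat := by omega
      rw [hlen]
      simp only [List.map_map]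
      apply List.map_congr_left
      intro k hk
      simp only [List.mem_range] at hk
      have hkr : (k : Int) < r1 := by omega
      simp only [Function.comp, pvW]
      rw [if_neg (by omega), if_pos (by omega)]
      omega
    have c3 : (PySem.List.pyRange (4 + r1) num 1).map pvW
        = (PySem.List.pyRange 0 m 1).map (fun i => r1 + i * 2) := by
      by_cases hm : m = 0
      · rw [PySem.List.pyRange_one_eq_nil (by omega), PySem.List.pyRange_one_eq_nil (by omega)]
        simp
      · have hr12 : r1 = 12 := by omega
        rw [PySem.List.pyRange_one (4 + r1) num, PySem.List.pyRange_one 0 m]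
        have : (num - (4 + r1)).toNat = (m - 0).toNat := by omega
        rw [this]
        simp only [List.map_map]
        apply List.map_congr_left
        intro k _
        simp only [Function.comp, pvW]
        rw [if_neg (by omega), if_neg (by omega)]
        omega
    rw [c1, c2, c3]
    simp only [PySem.List.foldl_append_singleton_eq_map]
    by_cases hm : m = 0
    · rw [if_pos (by omega : num - 4 - r1 = 0)]
      have : PySem.List.pyRange 0 m 1 = [] := PySem.List.pyRange_one_eq_nil (by omega)
      rw [hmdef] at this
      rw [this]
      simp
    · rw [if_neg (by omega : ¬ num - 4 - r1 = 0)]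
      simp

-- the k-th element of B's concrete delta list is pvDelta k (for k in range)
theorem pvDlist_get (num : Int) (k : Nat) (hk : (k : Int) < num - 1) :
    (List.replicate 4 (0 : Int) ++ List.replicate 11 1 ++ [0] ++
      List.replicate (max (num - 17) 0).toNat 2)[k]? = some (pvDelta k) := by
  have hlen : k < 16 + (max (num - 17) 0).toNat := by omega
  unfold pvDelta
  rcases lt_or_ge k 16 with h16 | h16
  · rw [List.getElem?_append_left (by
      simp only [List.length_append, List.length_replicate, List.length_cons, List.length_nil]
      omega)]
    rcases lt_or_ge k 4 with h4 | h4
    · rw [List.getElem?_append_left (by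
        simp only [List.length_append, List.length_replicate]
        omega),
        List.getElem?_append_left (by simp only [List.length_replicate]; omega),
        List.getElem?_replicate, if_pos h4, if_pos h4]
    · rcases lt_or_ge k 15 with h15 | h15
      · rw [List.getElem?_append_left (by
          simp only [List.length_append, List.length_replicate]
          omega),
          List.getElem?_append_right (by simp only [List.length_replicate]; omega),
          List.getElem?_replicate]
        simp only [List.length_replicate]
        rw [if_pos (by omega), if_neg (by omega), if_pos (by omega)]
      · have hke : k = 15 := by omega
        subst hke
        rw [List.getElem?_append_right (by
          simp only [List.length_append, List.length_replicate]; omega)]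
        simp
  · rw [List.getElem?_append_right (by
      simp only [List.length_append, List.length_replicate, List.length_cons, List.length_nil]
      omega),
      List.getElem?_replicate]
    simp only [List.length_append, List.length_replicate, List.length_cons, List.length_nil]
    rw [if_pos (by omega), if_neg (by omega), if_neg (by omega), if_neg (by omega)]

-- loop invariant: after consuming n deltas, the scan equals the first n+1 weights
theorem pv_scan_inv (num : Int) : ∀ n : Nat, (n : Int) ≤ num - 1 →
    ((List.replicate 4 (0 : Int) ++ List.replicate 11 1 ++ [0] ++
       List.replicate (max (num - 17) 0).toNat 2).take n).foldl
      (fun out d => out ++ [out.getLastD 0 + d]) [1]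
    = (List.range (n + 1)).map (fun k : Nat => pvW (k : Int)) := by
  intro n
  induction n with
  | zero => intro _; simp [pvW]
  | succ n ih =>
    intro hn
    have hn' : (n : Int) ≤ num - 1 := by push_cast at hn ⊢; omega
    rw [List.take_add_one, pvDlist_get num n (by push_cast at hn ⊢; omega)]
    simp only [Option.toList_some]
    rw [List.foldl_append, ih hn']
    have hlast : ((List.range (n + 1)).map (fun k : Nat => pvW (k : Int))).getLastD 0 = pvW n := by
      rw [List.range_succ, List.map_append]
      simp
    simp only [List.foldl_cons, List.foldl_nil, hlast]
    rw [List.range_succ (n := n + 1), List.map_append]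
    simp [pvW_step n]

theorem formatWeight_eq (num : Int) : formatWeight_py num = formatWeight_py_alt num := by
  rw [formatWeight_A_eq_map]
  unfold formatWeight_py_alt
  by_cases h : num ≤ 0
  · rw [if_pos h, PySem.List.pyRange_one_eq_nil (by omega)]
    simp
  · rw [if_neg h]
    have := pv_scan_inv num (num - 1).toNat (by omega)
    simp only at this
    rw [this]
    rw [PySem.List.pyRange_one 0 num]
    have : (num - 1).toNat + 1 = (num - 0).toNat := by omega
    rw [this]
    simp [List.map_map]

-- ===== VERDICT (by name: the statement is the Claim_ definition above) =====
theorem formatWeight_py_spec : Claim_equal_formatWeight_py := by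
  intro num _
  unfold Spec_formatWeight_py
  exact formatWeight_eq num
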